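-- pv_equiv track=rewrite | github.com/dangeles/WormFiles | useful_scripts/src/cas9_unc54_b3_analysis.py | when_did_it_die
-- ===== SOURCE A (Python) =====
-- def when_did_it_die(P0, days):
--     """
--     Given a P0 and an array of days in which it was alive, censored or dead,
--     figure out its lifespan and the number of days it was alive'
--
--     Note, the lifespan is considered to last up to the last observation.
--     I.e., a worm that was observed to live 3 days, and died on day 4
--     would have a lifespan of 4 days.
--
--     If a worm wasn't observed to die, it is considered censored for all practical
--     purposes
--
--     P0= a unique identifier, typically a number, always a scalar or a string
--     days= an array or array-like of floats or ints consisting of -1, 0, or 1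
--
--     returns:
--     Worm Identifier, Lifespan, Death Observed(1) or Censored (0)
--     """
--     counter=0
--     for day in days:
--         if day == 0: #worm died, add last day and return
-- #            counter+=1
--             return [P0, counter, 1]
--         elif day == -1: #worm was censored, add last day and return
-- #            counter+=1
--             return [P0, counter, 0]
--         elif day == 1:
--             counter+=1
--     return [P0, counter, 0]
-- ===== SOURCE B (Python) =====
-- def when_did_it_die(P0, days):
--     days = list(days)
--     end = next((i for i, d in enumerate(days) if d == 0 or d == -1), None)
--     if end is None:
--         return [P0, days.count(1), 0]
--     return [P0, days[:end].count(1), 1 if days[end] == 0 else 0]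
-- ===== Notes on version B (the rewrite author's own statement) =====
-- stated objective: alternative
-- what changed: Replaces A's single early-return accumulator loop with a locate-then-count decomposition: first find the index of the first terminal observation (0 or -1), then count the 1s before it and read the status off that element.
import Mathlib
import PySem

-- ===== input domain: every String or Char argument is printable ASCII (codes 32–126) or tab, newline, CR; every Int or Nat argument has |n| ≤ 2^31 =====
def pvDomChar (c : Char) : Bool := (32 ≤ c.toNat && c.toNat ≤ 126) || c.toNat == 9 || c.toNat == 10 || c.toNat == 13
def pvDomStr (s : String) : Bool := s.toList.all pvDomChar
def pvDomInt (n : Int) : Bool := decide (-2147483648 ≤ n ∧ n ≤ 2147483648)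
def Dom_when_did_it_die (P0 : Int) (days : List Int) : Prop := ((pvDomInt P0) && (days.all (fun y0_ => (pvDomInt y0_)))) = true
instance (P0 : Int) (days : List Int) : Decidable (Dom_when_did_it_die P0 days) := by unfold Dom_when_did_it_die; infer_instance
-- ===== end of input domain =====

-- B replaces A's early-return accumulator loop with a locate-then-count decomposition (find first 0/-1, then count 1s before it); alternative structure, same cost.

-- ===== PORT A =====
-- A's for-loop with early returns, as structural recursion carrying the counter.
def whenDidItDieLoop (P0 : Int) (counter : Int) : List Int → List Int
  | [] => [P0, counter, 0]
  | day :: rest =>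
    if day = 0 then [P0, counter, 1]
    else if day = -1 then [P0, counter, 0]
    else if day = 1 then whenDidItDieLoop P0 (counter + 1) rest
    else whenDidItDieLoop P0 counter rest

def when_did_it_die (P0 : Int) (days : List Int) : List Int :=
  whenDidItDieLoop P0 0 days

-- ===== PORT B =====
-- Source B: end = first index with d == 0 or d == -1; if none, [P0, days.count(1), 0];
-- else [P0, days[:end].count(1), 1 if days[end] == 0 else 0].
def when_did_it_die_alt (P0 : Int) (days : List Int) : List Int :=
  match days.findIdx? (fun d => d == 0 || d == -1) with
  | none => [P0, days.count 1, 0]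
  | some e => [P0, (PySem.List.slice days none (some (e : Int))).count 1,
               if (PySem.List.pyGet? days (e : Int)).getD 0 = 0 then 1 else 0]

-- ===== PRECONDITION & SPEC =====
def Spec_when_did_it_die (P0 : Int) (days : List Int) (out : List Int) : Prop := out = when_did_it_die_alt P0 days
instance (P0 : Int) (days : List Int) (out : List Int) : Decidable (Spec_when_did_it_die P0 days out) := by unfold Spec_when_did_it_die; infer_instance

-- ===== CLAIM (what is proved, stated in full; the proofs are below) =====
def Claim_equal_when_did_it_die : Prop := ∀ (P0 : Int) (days : List Int), Dom_when_did_it_die P0 days → Spec_when_did_it_die P0 days (when_did_it_die P0 days)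

-- ===== LEMMAS AND PROOFS =====

lemma whenDidItDieLoop_eq (P0 c : Int) (days : List Int) :
    whenDidItDieLoop P0 c days =
      match days.findIdx? (fun d => d == 0 || d == -1) with
      | none => [P0, c + days.count 1, 0]
      | some e => [P0, c + (days.take e).count 1,
                   if (days[e]?.getD 0) = 0 then 1 else 0] := by
  induction days generalizing c with
  | nil => simp [whenDidItDieLoop]
  | cons d rest ih =>
    by_cases h0 : d = 0
    · simp [whenDidItDieLoop, h0, List.findIdx?_cons]
    · by_cases h1 : d = -1
      · simp [whenDidItDieLoop, h1, List.findIdx?_cons]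
      · have hfind : (d :: rest).findIdx? (fun d => d == 0 || d == -1)
            = (rest.findIdx? (fun d => d == 0 || d == -1)).map (· + 1) := by
          simp [List.findIdx?_cons, h0, h1]
        by_cases h2 : d = 1
        · rw [whenDidItDieLoop, if_neg h0, if_neg h1, if_pos h2, ih, hfind]
          cases hr : rest.findIdx? (fun d => d == 0 || d == -1) with
          | none => simp [h2]; ring
          | some e => simp [h2]; ring
        · rw [whenDidItDieLoop, if_neg h0, if_neg h1, if_neg h2, ih, hfind]
          cases hr : rest.findIdx? (fun d => d == 0 || d == -1) with
          | none => simp [h2]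
          | some e => simp [h2]

-- ===== VERDICT (by name: the statement is the Claim_ definition above) =====
theorem when_did_it_die_spec : Claim_equal_when_did_it_die := by
  intro P0 days _
  unfold Spec_when_did_it_die when_did_it_die when_did_it_die_alt
  rw [whenDidItDieLoop_eq]
  cases hr : days.findIdx? (fun d => d == 0 || d == -1) with
  | none => simp
  | some e =>
    have he : e < days.length := (List.findIdx?_eq_some_iff_findIdx_eq.mp hr).1
    simp [PySem.List.slice_to_natCast, PySem.List.pyGet?, PySem.List.pyIdx?, he]
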